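-- pv_equiv track=rewrite | github.com/mintchoco89/geneticAlgo | ModeFair_Ooi_Jing_Ru.py | check_valid_solution
-- ===== SOURCE A (Python) =====
-- def check_valid_solution(solution, num_customers):
--     assigned_customers = set()
--     for vehicle_route in solution:
--         for customer in vehicle_route['route']:
--             if customer[0] in assigned_customers:
--                 return False
--             assigned_customers.add(customer[0])
--     return len(assigned_customers) == num_customers
-- ===== SOURCE B (Python) =====
-- def check_valid_solution(solution, num_customers):
--     ids = sorted(c[0] for vr in solution for c in vr['route'])
--     if len(ids) != num_customers:
--         return False
--     return all(x < y for x, y in zip(ids, ids[1:]))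
-- ===== Notes on version B (the rewrite author's own statement) =====
-- stated objective: alternative
-- what changed: Replaces A's incremental hash-set with per-element membership tests and early exit by a sort-then-scan algorithm: collect all ids, sort them, require the total count to equal num_customers, and detect duplicates by checking that adjacent sorted elements are strictly increasing.
-- outside the precondition, e.g. on check_valid_solution([{'route': [(1, 0), (1, 0)]}, {}], 1): A returns False, B raises KeyError
import Mathlib
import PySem

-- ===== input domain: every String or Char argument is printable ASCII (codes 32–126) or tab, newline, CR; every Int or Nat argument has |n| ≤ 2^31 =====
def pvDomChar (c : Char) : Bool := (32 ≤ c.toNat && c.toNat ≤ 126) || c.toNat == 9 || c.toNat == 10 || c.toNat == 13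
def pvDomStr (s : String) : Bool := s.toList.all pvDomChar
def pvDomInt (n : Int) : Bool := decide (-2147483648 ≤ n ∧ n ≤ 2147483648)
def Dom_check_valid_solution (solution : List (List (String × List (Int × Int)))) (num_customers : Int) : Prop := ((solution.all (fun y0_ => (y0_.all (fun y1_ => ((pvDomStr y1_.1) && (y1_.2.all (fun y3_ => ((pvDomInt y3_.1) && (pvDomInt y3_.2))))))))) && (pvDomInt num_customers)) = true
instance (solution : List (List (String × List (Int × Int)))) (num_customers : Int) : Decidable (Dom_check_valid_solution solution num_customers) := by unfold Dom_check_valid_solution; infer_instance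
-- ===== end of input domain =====

-- B sorts all customer ids, compares the total count with num_customers, and detects duplicates
-- by a strict-increase scan of adjacent sorted elements; objective: an alternative (sort-then-scan) algorithm.

-- ===== PORT A =====
-- inner `for customer in vehicle_route['route']`: none = early `return False`
def pvAInner (assigned : PySem.Set Int) (route : List (Int × Int)) : Option (PySem.Set Int) :=
  match route with
  | [] => some assigned
  | c :: rest =>
    if PySem.Set.contains assigned c.1 then none
    else pvAInner (PySem.Set.add assigned c.1) rest

-- outer `for vehicle_route in solution` (KeyError on a missing 'route' key is excluded by Pre_)
def pvAOuter (assigned : PySem.Set Int) (sol : List (List (String × List (Int × Int)))) : Option (PySem.Set Int) :=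
  match sol with
  | [] => some assigned
  | vr :: rest =>
    match pvAInner assigned ((PySem.Dict.mk vr).getD "route" []) with
    | none => none
    | some s => pvAOuter s rest

def check_valid_solution (solution : List (List (String × List (Int × Int)))) (num_customers : Int) : Bool :=
  match pvAOuter PySem.Set.empty solution with
  | none => false
  | some assigned => decide ((assigned.length : Int) = num_customers)

-- ===== PORT B =====
-- ids = sorted(c[0] for vr in solution for c in vr['route'])
-- if len(ids) != num_customers: return False
-- return all(x < y for x, y in zip(ids, ids[1:]))
def check_valid_solution_alt (solution : List (List (String × List (Int × Int)))) (num_customers : Int) : Bool :=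
  let ids := PySem.List.sorted
    (solution.flatMap (fun vr => ((PySem.Dict.mk vr).getD "route" []).map Prod.fst))
    (fun x => x) false
  if ((ids.length : Int) ≠ num_customers) then false
  else (ids.zip (ids.drop 1)).all (fun p => decide (p.1 < p.2))

-- ===== PRECONDITION & SPEC =====
-- Pre_ excludes solutions in which some vehicle dict lacks the 'route' key: B (and usually A) raises
-- KeyError there; A can still return False first when a duplicate id precedes the malformed dict.
def Pre_check_valid_solution (solution : List (List (String × List (Int × Int)))) (num_customers : Int) : Prop :=
  solution.all (fun vr => (PySem.Dict.mk vr).contains "route") = true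
instance (solution : List (List (String × List (Int × Int)))) (num_customers : Int) : Decidable (Pre_check_valid_solution solution num_customers) := by unfold Pre_check_valid_solution; infer_instance

def pvWitness_check_valid_solution : (List (List (String × List (Int × Int)))) × Int :=
  ([[("route", [(1, 2), (2, 3)])], [("route", [(3, 4)])]], 3)

def Spec_check_valid_solution (solution : List (List (String × List (Int × Int)))) (num_customers : Int) (out : Bool) : Prop := out = check_valid_solution_alt solution num_customers
instance (solution : List (List (String × List (Int × Int)))) (num_customers : Int) (out : Bool) : Decidable (Spec_check_valid_solution solution num_customers out) := by unfold Spec_check_valid_solution; infer_instance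

-- ===== CLAIM (what is proved, stated in full; the proofs are below) =====
def Claim_equal_check_valid_solution : Prop := ∀ (solution : List (List (String × List (Int × Int)))) (num_customers : Int), Dom_check_valid_solution solution num_customers → Pre_check_valid_solution solution num_customers → Spec_check_valid_solution solution num_customers (check_valid_solution solution num_customers)

-- ===== LEMMAS AND PROOFS =====

-- all customer ids of the solution, in traversal order
def pvIds (sol : List (List (String × List (Int × Int)))) : List Int :=
  sol.flatMap (fun vr => ((PySem.Dict.mk vr).getD "route" []).map Prod.fst)

lemma pvAInner_eq (route : List (Int × Int)) (s : PySem.Set Int) (hs : s.Nodup) :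
    pvAInner s route =
      if (s ++ route.map Prod.fst).Nodup then some (s ++ route.map Prod.fst) else none := by
  induction route generalizing s with
  | nil => simp [pvAInner, hs]
  | cons c rest ih =>
    simp only [pvAInner, List.map_cons]
    by_cases hc : c.1 ∈ s
    · rw [if_pos (by simpa [PySem.Set.contains_iff] using hc), if_neg]
      intro hnd
      exact (List.nodup_append.mp hnd).2.2 c.1 hc c.1 (List.mem_cons_self ..) rfl
    · rw [if_neg (by simpa [PySem.Set.contains_iff] using hc),
        PySem.Set.add_of_not_mem hc,
        ih (s ++ [c.1]) (by
          refine hs.append (List.nodup_singleton c.1) ?_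
          intro a ha hb
          rw [List.mem_singleton] at hb
          exact absurd (hb ▸ ha) hc)]
      congr 1 <;> simp [List.append_assoc]

lemma pvAOuter_eq (sol : List (List (String × List (Int × Int)))) (s : PySem.Set Int) (hs : s.Nodup) :
    pvAOuter s sol =
      if (s ++ pvIds sol).Nodup then some (s ++ pvIds sol) else none := by
  induction sol generalizing s with
  | nil => simp [pvAOuter, pvIds, hs]
  | cons vr rest ih =>
    simp only [pvAOuter, pvIds, List.flatMap_cons]
    rw [pvAInner_eq _ _ hs]
    by_cases h1 : (s ++ ((PySem.Dict.mk vr).getD "route" []).map Prod.fst).Nodup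
    · rw [if_pos h1]
      show pvAOuter (s ++ ((PySem.Dict.mk vr).getD "route" []).map Prod.fst) rest = _
      rw [ih _ h1]
      simp only [pvIds, List.append_assoc]
    · rw [if_neg h1]
      have h2 : ¬ (s ++ (((PySem.Dict.mk vr).getD "route" []).map Prod.fst ++
          rest.flatMap (fun vr => ((PySem.Dict.mk vr).getD "route" []).map Prod.fst))).Nodup := by
        intro hnd
        rw [← List.append_assoc] at hnd
        exact h1 ((List.sublist_append_left _ _).nodup hnd)
      rw [if_neg h2]

-- the adjacent-pairs scan equals IsChain (<)
lemma pv_zip_all_lt (s : List Int) :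
    (s.zip (s.drop 1)).all (fun p => decide (p.1 < p.2)) = true ↔ List.IsChain (· < ·) s := by
  induction s with
  | nil => simp
  | cons a t ih =>
    cases t with
    | nil => simp [List.IsChain.singleton]
    | cons b u =>
      simp only [List.drop_succ_cons, List.drop_zero, List.zip_cons_cons, List.all_cons,
        Bool.and_eq_true, decide_eq_true_eq, List.isChain_cons_cons]
      exact and_congr Iff.rfl ih

-- on a ≤-sorted list, strict adjacent increase ↔ no duplicates
lemma pv_chain_lt_iff_nodup (s : List Int) (hle : s.Pairwise (· ≤ ·)) :
    List.IsChain (· < ·) s ↔ s.Nodup := by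
  rw [List.isChain_iff_pairwise]
  constructor
  · intro h; exact h.imp ne_of_lt
  · intro h
    exact (hle.and h).imp (fun ⟨h1, h2⟩ => lt_of_le_of_ne h1 h2)

-- B's body, characterised: duplicate-freedom plus the count check
lemma pvB_eq (ids0 : List Int) (n : Int) :
    (if ((PySem.List.sorted ids0 (fun x => x) false).length : Int) ≠ n then false
     else ((PySem.List.sorted ids0 (fun x => x) false).zip
            ((PySem.List.sorted ids0 (fun x => x) false).drop 1)).all
          (fun p => decide (p.1 < p.2)))
    = if ids0.Nodup then decide ((ids0.length : Int) = n) else false := by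
  have hperm : (PySem.List.sorted ids0 (fun x => x) false).Perm ids0 :=
    PySem.List.sorted_perm ids0 (fun x => x) false
  have hpair : (PySem.List.sorted ids0 (fun x => x) false).Pairwise (· ≤ ·) := by
    simpa using PySem.List.sorted_pairwise ids0 (fun x => x)
  generalize hgen : PySem.List.sorted ids0 (fun x => x) false = s at *
  have hlen : s.length = ids0.length := hperm.length_eq
  by_cases hn : (ids0.length : Int) = n
  · rw [if_neg (by rw [hlen]; simpa using hn)]
    by_cases hnd : ids0.Nodup
    · rw [if_pos hnd, (pv_zip_all_lt s).mpr
        ((pv_chain_lt_iff_nodup s hpair).mpr (hperm.nodup_iff.mpr hnd)), decide_eq_true hn]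
    · rw [if_neg hnd]
      have : ¬ List.IsChain (· < ·) s := by
        rw [pv_chain_lt_iff_nodup s hpair]
        exact fun h => hnd (hperm.nodup_iff.mp h)
      rcases Bool.eq_false_or_eq_true ((s.zip (s.drop 1)).all (fun p => decide (p.1 < p.2))) with h | h
      · exact absurd ((pv_zip_all_lt s).mp h) this
      · exact h
  · rw [if_pos (by rw [hlen]; simpa using hn)]
    split <;> simp [hn]

-- ===== VERDICT (by name: the statement is the Claim_ definition above) =====
theorem check_valid_solution_spec : Claim_equal_check_valid_solution := by
  intro solution num_customers _ _
  unfold Spec_check_valid_solution check_valid_solution check_valid_solution_alt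
  rw [pvAOuter_eq solution PySem.Set.empty List.nodup_nil]
  simp only [PySem.Set.empty, List.nil_append]
  show _ = (if ((PySem.List.sorted (pvIds solution) (fun x => x) false).length : Int) ≠ num_customers then false
     else ((PySem.List.sorted (pvIds solution) (fun x => x) false).zip
            ((PySem.List.sorted (pvIds solution) (fun x => x) false).drop 1)).all
          (fun p => decide (p.1 < p.2)))
  rw [pvB_eq (pvIds solution) num_customers]
  by_cases hnd : (pvIds solution).Nodup
  · rw [if_pos hnd, if_pos hnd]
  · rw [if_neg hnd, if_neg hnd]
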